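-- pv_equiv track=rewrite | github.com/Yug-Oswal/reward-hacking | py_scripts/compile_v1.py | contiguous_bands
-- ===== SOURCE A (Python) =====
-- def contiguous_bands(mask, layers):
--     bands = []
--     start = None
--
--     for i, m in enumerate(mask):
--         if m and start is None:
--             start = layers[i]
--         elif not m and start is not None:
--             bands.append((start, layers[i-1]))
--             start = None
--
--     if start is not None:
--         bands.append((start, layers[-1]))
--
--     return bands
-- ===== SOURCE B (Python) =====
-- def contiguous_bands(mask, layers):
--     # Two-pointer run scan: find each maximal truthy run [i..j], emit one band per run.
--     bands = []
--     n = len(mask)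
--     i = 0
--     while i < n:
--         if mask[i]:
--             j = i
--             while j + 1 < n and mask[j + 1]:
--                 j += 1
--             bands.append((layers[i], layers[j]))
--             i = j + 1
--         else:
--             i += 1
--     return bands
-- ===== Notes on version B (the rewrite author's own statement) =====
-- stated objective: alternative
-- what changed: Replaces A's single-pass state machine (an Optional 'start' flag updated per element) with a two-pointer scan over maximal truthy runs; Pre_ excludes inputs where a truthy mask index has no layer (A may raise IndexError there or silently reuse layers[-1], and B raises).
-- intended difference: When the mask ends in a truthy run and layers is longer than mask (with a different value at the run's end), A closes the trailing band with layers[-1] — the last layer overall, not the layer at the run's end — while B returns layers[len(mask)-1], the layer actually under the run's last index, which is what a band over the mask means. — e.g. on contiguous_bands([true], [1, 2]): A returns [(1, 2)], B returns [(1, 1)]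
-- outside the precondition, e.g. on contiguous_bands([True, True], [5]): A returns [(5, 5)], B raises IndexError
import Mathlib
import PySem

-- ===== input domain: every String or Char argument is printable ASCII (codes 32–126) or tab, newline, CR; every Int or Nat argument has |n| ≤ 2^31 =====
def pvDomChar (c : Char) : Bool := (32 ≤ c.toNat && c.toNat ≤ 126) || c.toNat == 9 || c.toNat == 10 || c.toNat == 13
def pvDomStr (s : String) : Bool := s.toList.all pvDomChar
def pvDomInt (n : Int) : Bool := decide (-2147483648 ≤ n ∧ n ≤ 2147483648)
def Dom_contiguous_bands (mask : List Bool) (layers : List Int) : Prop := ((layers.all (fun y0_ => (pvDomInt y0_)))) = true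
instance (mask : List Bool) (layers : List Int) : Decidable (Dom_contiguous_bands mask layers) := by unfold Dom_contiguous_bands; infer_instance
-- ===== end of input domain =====

-- B replaces A's one-pass start/None state machine by a two-pointer scan over maximal truthy runs
-- (objective: alternative decomposition, same O(n) cost); on a trailing truthy run with extra
-- layers beyond the mask, B ends the band at layers[len(mask)-1] where A uses layers[-1] (see D_).

-- ===== PORT A =====
-- A: for i, m in enumerate(mask) with state (bands, start); trailing open run closed with layers[-1].
def contiguous_bands (mask : List Bool) (layers : List Int) : List (Int × Int) :=
  let st := (PySem.List.enumerate mask).foldl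
    (fun (s : List (Int × Int) × Option Int) (p : Int × Bool) =>
      match s.2 with
      | none   => if p.2 then (s.1, some (PySem.List.pyGetD layers p.1 0)) else s
      | some v => if p.2 then s
                  else (s.1 ++ [(v, PySem.List.pyGetD layers (p.1 - 1) 0)], none))
    ([], none)
  match st.2 with
  | none => st.1
  | some v => st.1 ++ [(v, PySem.List.pyGetD layers (-1) 0)]

-- ===== PORT B =====
-- inner while of Source B: extend j while mask[j+1] is truthy
def pvRunEnd (mask : List Bool) (j : Nat) : Nat :=
  if j + 1 < mask.length ∧ mask.getD (j + 1) false = true then pvRunEnd mask (j + 1) else j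
termination_by mask.length - j
decreasing_by omega

theorem pvRunEnd_ge (mask : List Bool) (j : Nat) : j ≤ pvRunEnd mask j := by
  unfold pvRunEnd
  split
  · exact Nat.le_trans (Nat.le_succ j) (pvRunEnd_ge mask (j + 1))
  · exact Nat.le_refl j
termination_by mask.length - j
decreasing_by omega

-- outer while of Source B
def pvBandLoop (mask : List Bool) (layers : List Int) (i : Nat) : List (Int × Int) :=
  if hi : i < mask.length then
    if mask.getD i false then
      let j := pvRunEnd mask i
      (PySem.List.pyGetD layers (i : Int) 0, PySem.List.pyGetD layers (j : Int) 0)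
        :: pvBandLoop mask layers (j + 1)
    else pvBandLoop mask layers (i + 1)
  else []
termination_by mask.length - i
decreasing_by
  · have := pvRunEnd_ge mask i; omega
  · omega

def contiguous_bands_alt (mask : List Bool) (layers : List Int) : List (Int × Int) :=
  pvBandLoop mask layers 0

-- ===== PRECONDITION & SPEC =====
-- Pre_ excludes inputs where some truthy mask index is out of range of layers: there A either
-- raises IndexError (at a run boundary) or silently reads layers[-1]/nothing for an interior
-- index, and B raises; such inputs are outside the natural domain of a mask over the layers.
def Pre_contiguous_bands (mask : List Bool) (layers : List Int) : Prop :=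
  ∀ i, i < mask.length → mask.getD i false = true → i < layers.length
instance (mask : List Bool) (layers : List Int) : Decidable (Pre_contiguous_bands mask layers) := by
  unfold Pre_contiguous_bands; infer_instance

def pvWitness_contiguous_bands : List Bool × List Int := ([true, false, true], [10, 20, 30])

-- When the mask ends in a truthy run and layers is longer than mask with a different value at the
-- run's end, A closes the trailing band with layers[-1] (the last layer overall) while B returns
-- layers[len(mask)-1], the layer under the run's last index — the intended end of a band over the mask.
def D_contiguous_bands (mask : List Bool) (layers : List Int) : Prop :=
  mask.getD (mask.length - 1) false = true ∧ mask.length ≤ layers.length ∧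
    layers.getD (mask.length - 1) 0 ≠ layers.getD (layers.length - 1) 0
instance (mask : List Bool) (layers : List Int) : Decidable (D_contiguous_bands mask layers) := by
  unfold D_contiguous_bands; infer_instance

def Spec_contiguous_bands (mask : List Bool) (layers : List Int) (out : List (Int × Int)) : Prop := ¬ D_contiguous_bands mask layers → out = contiguous_bands_alt mask layers
instance (mask : List Bool) (layers : List Int) (out : List (Int × Int)) : Decidable (Spec_contiguous_bands mask layers out) := by unfold Spec_contiguous_bands; infer_instance

def pvDiffWitness_contiguous_bands : List Bool × List Int := ([true], [1, 2])
def pvDiffWitnessOut_contiguous_bands : (List (Int × Int)) × (List (Int × Int)) := ([(1, 2)], [(1, 1)])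

-- ===== CLAIM (what is proved, stated in full; the proofs are below) =====
def Claim_unchanged_contiguous_bands : Prop := ∀ (mask : List Bool) (layers : List Int), Dom_contiguous_bands mask layers → Pre_contiguous_bands mask layers → Spec_contiguous_bands mask layers (contiguous_bands mask layers)
def Claim_changed_contiguous_bands : Prop := Dom_contiguous_bands (pvDiffWitness_contiguous_bands.1) (pvDiffWitness_contiguous_bands.2) ∧ Pre_contiguous_bands (pvDiffWitness_contiguous_bands.1) (pvDiffWitness_contiguous_bands.2) ∧ D_contiguous_bands (pvDiffWitness_contiguous_bands.1) (pvDiffWitness_contiguous_bands.2) ∧ contiguous_bands (pvDiffWitness_contiguous_bands.1) (pvDiffWitness_contiguous_bands.2) = pvDiffWitnessOut_contiguous_bands.1 ∧ contiguous_bands_alt (pvDiffWitness_contiguous_bands.1) (pvDiffWitness_contiguous_bands.2) = pvDiffWitnessOut_contiguous_bands.2 ∧ pvDiffWitnessOut_contiguous_bands.1 ≠ pvDiffWitnessOut_contiguous_bands.2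
def Claim_exact_contiguous_bands : Prop := ∀ (mask : List Bool) (layers : List Int), Dom_contiguous_bands mask layers → Pre_contiguous_bands mask layers → D_contiguous_bands mask layers → contiguous_bands mask layers ≠ contiguous_bands_alt mask layers

-- ===== LEMMAS AND PROOFS =====

-- A's loop body and finalisation, named for the proofs
def pvStep (layers : List Int) (s : List (Int × Int) × Option Int) (p : Int × Bool) :
    List (Int × Int) × Option Int :=
  match s.2 with
  | none   => if p.2 then (s.1, some (PySem.List.pyGetD layers p.1 0)) else s
  | some v => if p.2 then s
              else (s.1 ++ [(v, PySem.List.pyGetD layers (p.1 - 1) 0)], none)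

def pvFin (layers : List Int) (st : List (Int × Int) × Option Int) : List (Int × Int) :=
  match st.2 with
  | none => st.1
  | some v => st.1 ++ [(v, PySem.List.pyGetD layers (-1) 0)]

theorem contiguous_bands_eq_fin (mask : List Bool) (layers : List Int) :
    contiguous_bands mask layers =
      pvFin layers ((PySem.List.enumerate mask).foldl (pvStep layers) ([], none)) := rfl

theorem pvRunEnd_stop (mask : List Bool) (j : Nat)
    (h : ¬ (j + 1 < mask.length ∧ mask.getD (j + 1) false = true)) :
    pvRunEnd mask j = j := by
  conv_lhs => rw [pvRunEnd]
  rw [if_neg h]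

theorem pvRunEnd_step (mask : List Bool) (j : Nat)
    (h : j + 1 < mask.length ∧ mask.getD (j + 1) false = true) :
    pvRunEnd mask j = pvRunEnd mask (j + 1) := by
  conv_lhs => rw [pvRunEnd]
  rw [if_pos h]

theorem pvRunEnd_truthy (mask : List Bool) (j : Nat) (h : mask.getD j false = true) :
    mask.getD (pvRunEnd mask j) false = true := by
  by_cases hc : j + 1 < mask.length ∧ mask.getD (j + 1) false = true
  · rw [pvRunEnd_step mask j hc]
    exact pvRunEnd_truthy mask (j + 1) hc.2
  · rw [pvRunEnd_stop mask j hc]; exact h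
termination_by mask.length - j
decreasing_by omega

theorem pvRunEnd_lt (mask : List Bool) (j : Nat) (h : j < mask.length) :
    pvRunEnd mask j < mask.length := by
  by_cases hc : j + 1 < mask.length ∧ mask.getD (j + 1) false = true
  · rw [pvRunEnd_step mask j hc]
    exact pvRunEnd_lt mask (j + 1) hc.1
  · rw [pvRunEnd_stop mask j hc]; exact h
termination_by mask.length - j
decreasing_by omega

-- A's algorithm recast as the same two-pointer loop, keeping A's layers[-1] on a trailing run
def pvBandLoopA (mask : List Bool) (layers : List Int) (i : Nat) : List (Int × Int) :=
  if hi : i < mask.length then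
    if mask.getD i false then
      let j := pvRunEnd mask i
      let e := if j = mask.length - 1 then PySem.List.pyGetD layers (-1) 0
               else PySem.List.pyGetD layers (j : Int) 0
      (PySem.List.pyGetD layers (i : Int) 0, e) :: pvBandLoopA mask layers (j + 1)
    else pvBandLoopA mask layers (i + 1)
  else []
termination_by mask.length - i
decreasing_by
  · have := pvRunEnd_ge mask i; omega
  · omega

-- Main invariant: running A's loop on the suffix from i with accumulated bands `acc` and
-- state `st` yields exactly `acc` followed by pvBandLoopA's bands from the matching position.
theorem pvMain (mask : List Bool) (layers : List Int) :
    ∀ fuel i (acc : List (Int × Int)) (st : Option Int),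
      mask.length - i ≤ fuel →
      (st.isSome = true → 1 ≤ i ∧ i ≤ mask.length) →
      pvFin layers ((PySem.List.enumerate (mask.drop i) (i : Int)).foldl (pvStep layers) (acc, st)) =
        (match st with
         | none => acc ++ pvBandLoopA mask layers i
         | some v =>
            acc ++ (v, if pvRunEnd mask (i - 1) = mask.length - 1 then PySem.List.pyGetD layers (-1) 0
                       else PySem.List.pyGetD layers ((pvRunEnd mask (i - 1) : Nat) : Int) 0)
                :: pvBandLoopA mask layers (pvRunEnd mask (i - 1) + 1)) := by
  intro fuel
  induction fuel with
  | zero =>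
    intro i acc st hf hst
    have hni : mask.length ≤ i := by omega
    rw [List.drop_eq_nil_of_le hni]
    cases st with
    | none =>
      simp [PySem.List.enumerate, pvFin]
      rw [pvBandLoopA]; simp [Nat.not_lt.mpr hni]
    | some v =>
      have h1 : 1 ≤ i ∧ i ≤ mask.length := hst rfl
      have hieq : i = mask.length := by omega
      have hre : pvRunEnd mask (i - 1) = i - 1 := by
        apply pvRunEnd_stop; omega
      have hj : pvRunEnd mask (i - 1) = mask.length - 1 := by rw [hre]; omega
      simp only [PySem.List.enumerate_nil, List.foldl_nil, pvFin]
      rw [hj, if_pos rfl, show mask.length - 1 + 1 = mask.length from by omega, pvBandLoopA]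
      simp
  | succ fuel ih =>
    intro i acc st hf hst
    by_cases hi : i < mask.length
    · -- unfold one loop iteration
      rw [List.drop_eq_getElem_cons hi, PySem.List.enumerate_cons, List.foldl_cons]
      have hgd : mask.getD i false = mask[i] := by
        rw [List.getD_eq_getElem?_getD, List.getElem?_eq_getElem hi]; rfl
      cases st with
      | none =>
        cases hm : mask[i] with
        | true =>
          have hstep : pvStep layers (acc, none) ((i : Int), true) =
              (acc, some (PySem.List.pyGetD layers (i : Int) 0)) := by
            simp [pvStep]
          rw [hstep]
          rw [show ((i : Int) + 1) = (((i + 1 : Nat) : Int)) by push_cast; ring]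
          rw [ih (i + 1) acc (some (PySem.List.pyGetD layers (i : Int) 0)) (by omega)
              (fun _ => by omega)]
          simp only [Nat.add_sub_cancel]
          conv_rhs => rw [pvBandLoopA]
          simp [hi, hm]
        | false =>
          have hstep : pvStep layers (acc, none) ((i : Int), false) = (acc, none) := by
            simp [pvStep]
          rw [hstep]
          rw [show ((i : Int) + 1) = (((i + 1 : Nat) : Int)) by push_cast; ring]
          rw [ih (i + 1) acc none (by omega) (by simp)]
          conv_rhs => rw [pvBandLoopA]
          simp [hi, hm]
      | some v =>
        have h1 : 1 ≤ i ∧ i ≤ mask.length := hst rfl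
        cases hm : mask[i] with
        | true =>
          have hstep : pvStep layers (acc, some v) ((i : Int), true) = (acc, some v) := by
            simp [pvStep]
          rw [hstep]
          rw [show ((i : Int) + 1) = (((i + 1 : Nat) : Int)) by push_cast; ring]
          rw [ih (i + 1) acc (some v) (by omega) (fun _ => by omega)]
          have hre : pvRunEnd mask (i - 1) = pvRunEnd mask i := by
            rw [pvRunEnd_step]
            · rw [show i - 1 + 1 = i by omega]
            · refine ⟨by omega, ?_⟩
              rw [show i - 1 + 1 = i by omega, hgd, hm]
          simp only [Nat.add_sub_cancel, hre]
        | false =>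
          have hstep : pvStep layers (acc, some v) ((i : Int), false) =
              (acc ++ [(v, PySem.List.pyGetD layers ((i : Int) - 1) 0)], none) := by
            simp [pvStep]
          rw [hstep]
          rw [show ((i : Int) + 1) = (((i + 1 : Nat) : Int)) by push_cast; ring]
          rw [ih (i + 1) _ none (by omega) (by simp)]
          have hre : pvRunEnd mask (i - 1) = i - 1 := by
            apply pvRunEnd_stop
            rw [show i - 1 + 1 = i by omega]
            intro hc
            rw [hgd, hm] at hc
            exact absurd hc.2 (by simp)
          have hne : ¬ (i - 1 = mask.length - 1) := by omega
          rw [hre, if_neg hne]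
          have hbl : pvBandLoopA mask layers (i - 1 + 1) = pvBandLoopA mask layers (i + 1) := by
            rw [show i - 1 + 1 = i by omega]
            conv_lhs => rw [pvBandLoopA]
            simp [hi, hm]
          rw [hbl]
          have hcast : ((i : Int) - 1) = (((i - 1 : Nat)) : Int) := by omega
          rw [hcast]
          simp
    · -- suffix empty: same as the base case
      have hni : mask.length ≤ i := by omega
      rw [List.drop_eq_nil_of_le hni]
      cases st with
      | none =>
        simp [PySem.List.enumerate, pvFin]
        rw [pvBandLoopA]; simp [Nat.not_lt.mpr hni]
      | some v =>
        have h1 : 1 ≤ i ∧ i ≤ mask.length := hst rfl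
        have hre : pvRunEnd mask (i - 1) = i - 1 := by
          apply pvRunEnd_stop; omega
        have hj : pvRunEnd mask (i - 1) = mask.length - 1 := by rw [hre]; omega
        simp only [PySem.List.enumerate_nil, List.foldl_nil, pvFin]
        rw [hj, if_pos rfl, show mask.length - 1 + 1 = mask.length from by omega, pvBandLoopA]
        simp

theorem pvA_eq_loopA (mask : List Bool) (layers : List Int) :
    contiguous_bands mask layers = pvBandLoopA mask layers 0 := by
  rw [contiguous_bands_eq_fin]
  have := pvMain mask layers mask.length 0 [] none (by omega) (by simp)
  simp only [List.drop_zero, Nat.cast_zero] at this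
  rw [this]
  rfl

-- layers[-1] = layers[len-1]
theorem pvLast_eq (layers : List Int) (h : 0 < layers.length) :
    PySem.List.pyGetD layers (-1) 0 =
      PySem.List.pyGetD layers (((layers.length - 1 : Nat) : Int)) 0 := by
  rw [PySem.List.pyGetD_neg_ofNat layers 1 0 (by omega) (by omega)]
  rw [PySem.List.pyGetD_natCast]
  rw [List.getD_eq_getElem?_getD, List.getElem?_eq_getElem (by omega)]
  rfl

-- Outside D_, A's trailing layers[-1] coincides with B's layers[j], so the two loops agree.
theorem pvLoopsEq (mask : List Bool) (layers : List Int)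
    (hpre : Pre_contiguous_bands mask layers) (hnd : ¬ D_contiguous_bands mask layers) :
    ∀ fuel i, mask.length - i ≤ fuel →
      pvBandLoopA mask layers i = pvBandLoop mask layers i := by
  intro fuel
  induction fuel with
  | zero =>
    intro i hf
    rw [pvBandLoopA, pvBandLoop]
    rw [dif_neg (by omega), dif_neg (by omega)]
  | succ fuel ih =>
    intro i hf
    rw [pvBandLoopA, pvBandLoop]
    by_cases hi : i < mask.length
    · rw [dif_pos hi, dif_pos hi]
      by_cases hm : mask.getD i false = true
      · rw [if_pos hm, if_pos hm]
        simp only []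
        have hj := pvRunEnd_ge mask i
        have hrec := ih (pvRunEnd mask i + 1) (by omega)
        rw [hrec]
        by_cases hend : pvRunEnd mask i = mask.length - 1
        · have ht : mask.getD (mask.length - 1) false = true := by
            rw [← hend]; exact pvRunEnd_truthy mask i hm
          have hlt : mask.length - 1 < layers.length := hpre _ (by omega) ht
          have hv : layers.getD (mask.length - 1) 0 = layers.getD (layers.length - 1) 0 := by
            by_contra hvne
            exact hnd ⟨ht, by omega, hvne⟩
          rw [if_pos hend, pvLast_eq layers (by omega), hend]
          simp only [PySem.List.pyGetD_natCast]
          rw [← hv]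
        · rw [if_neg hend]
      · rw [if_neg hm, if_neg hm]
        exact ih (i + 1) (by omega)
    · rw [dif_neg hi, dif_neg hi]

-- Inside D_ the two loops produce the same bands except the trailing band's end.
theorem pvLoopsNe (mask : List Bool) (layers : List Int)
    (hd : mask.getD (mask.length - 1) false = true) :
    ∀ fuel i, mask.length - i ≤ fuel → i < mask.length →
      ∃ pre s, pvBandLoopA mask layers i = pre ++ [(s, PySem.List.pyGetD layers (-1) 0)] ∧
               pvBandLoop mask layers i =
                 pre ++ [(s, PySem.List.pyGetD layers (((mask.length - 1 : Nat)) : Int) 0)] := by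
  intro fuel
  induction fuel with
  | zero => intro i hf hi; omega
  | succ fuel ih =>
    intro i hf hi
    rw [pvBandLoopA, pvBandLoop, dif_pos hi, dif_pos hi]
    by_cases hm : mask.getD i false = true
    · rw [if_pos hm, if_pos hm]
      simp only []
      have hjlt := pvRunEnd_lt mask i hi
      by_cases hend : pvRunEnd mask i = mask.length - 1
      · have hstop : pvBandLoopA mask layers (pvRunEnd mask i + 1) = [] := by
          rw [pvBandLoopA, dif_neg (by omega)]
        have hstop' : pvBandLoop mask layers (pvRunEnd mask i + 1) = [] := by
          rw [pvBandLoop, dif_neg (by omega)]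
        refine ⟨[], PySem.List.pyGetD layers (i : Int) 0, ?_, ?_⟩
        · rw [hstop, if_pos hend]; rfl
        · rw [hstop', hend]; rfl
      · obtain ⟨pre, s, h1, h2⟩ := ih (pvRunEnd mask i + 1)
          (by have := pvRunEnd_ge mask i; omega) (by omega)
        refine ⟨(PySem.List.pyGetD layers (i : Int) 0,
                 PySem.List.pyGetD layers ((pvRunEnd mask i : Nat) : Int) 0) :: pre, s, ?_, ?_⟩
        · rw [if_neg hend, h1]; rfl
        · rw [h2]; rfl
    · have hine : i ≠ mask.length - 1 := by
        intro h; rw [h] at hm; exact hm hd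
      obtain ⟨pre, s, h1, h2⟩ := ih (i + 1) (by omega) (by omega)
      exact ⟨pre, s, by rw [if_neg hm]; exact h1, by rw [if_neg hm]; exact h2⟩

-- ===== VERDICT (by name: the statements are the Claim_ definitions above) =====
theorem contiguous_bands_spec : Claim_unchanged_contiguous_bands := by
  intro mask layers _ hpre hnd
  rw [pvA_eq_loopA]
  exact (pvLoopsEq mask layers hpre hnd mask.length 0 (by omega)).symm ▸ rfl

theorem contiguous_bands_changed : Claim_changed_contiguous_bands := by
  unfold Claim_changed_contiguous_bands
  refine ⟨by decide, by decide, by decide, by decide, ?_, by decide⟩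
  show contiguous_bands_alt [true] [1, 2] = [(1, 1)]
  rw [contiguous_bands_alt, pvBandLoop]
  norm_num [pvRunEnd_stop [true] 0 (by decide)]
  rw [pvBandLoop]
  norm_num

theorem contiguous_bands_tight : Claim_exact_contiguous_bands := by
  intro mask layers _ hpre hd heq
  have hn : 0 < mask.length := by
    by_contra h
    have : mask = [] := by
      cases mask with
      | nil => rfl
      | cons a l => simp at h
    rw [this] at hd
    exact absurd hd.1 (by simp)
  obtain ⟨pre, s, h1, h2⟩ := pvLoopsNe mask layers hd.1 mask.length 0 (by omega) hn
  rw [pvA_eq_loopA] at heq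
  have heq2 : pre ++ [(s, PySem.List.pyGetD layers (-1) 0)] =
      pre ++ [(s, PySem.List.pyGetD layers (((mask.length - 1 : Nat)) : Int) 0)] := by
    rw [← h1, ← h2]; exact heq
  have hv : PySem.List.pyGetD layers (-1) 0 =
      PySem.List.pyGetD layers (((mask.length - 1 : Nat)) : Int) 0 := by
    have := List.append_cancel_left heq2
    simpa using this
  have hlen : 0 < layers.length := by have h21 := hd.2.1; omega
  rw [pvLast_eq layers hlen] at hv
  simp only [PySem.List.pyGetD_natCast] at hv
  have hA : layers.getD (layers.length - 1) 0 = layers.getD (mask.length - 1) 0 := hv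
  exact hd.2.2 hA.symm
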